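-- pv_equiv track=rewrite | github.com/barry-kui/An-optimal-samples-selection-System | 失败品1.py | get_fitness
-- ===== SOURCE A (Python) =====
-- import itertools
--
-- def generate_combination(samples,size):
--     samples = set(samples)
--     return list(itertools.combinations(samples,size))
--
-- def is_in_list(list1,list2):
--     list2 = set(list2)
--     result= [element for element in list1 if element in list2]
--     if len(result)==len(list2):
--         return True
--     else:
--         return False
--
-- def get_fitness(parent,pop,j,s):
--     max_fit = []
--     already_research = []
--     j_group = generate_combination(pop,j)
--     if j == s:
--         for i in parent:
--             fit = 0
--             for x in j_group:
--                 if is_in_list(i,x) and x not in already_research: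
--                     fit = fit + 1
--                     already_research.append(x)
--             max_fit.append(fit)
--     return max_fit
-- ===== SOURCE B (Python) =====
-- def get_fitness(parent, pop, j, s):
--     # Backtracking enumeration: per parent, generate directly the j-subsets of the
--     # distinct pop values that the parent covers (sum of its element counts over the
--     # subset equals j), instead of testing every combination; claimed subsets in a set.
--     if j != s:
--         return []
--     vals = list(dict.fromkeys(pop))
--     n = len(vals)
--     claimed = set()
--     fits = []
--     for ind in parent:
--         cnt = {}
--         for e in ind:
--             cnt[e] = cnt.get(e, 0) + 1
--         covered = []
--
--         def dfs(idx, chosen, total):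
--             if total > j:
--                 return
--             if len(chosen) == j:
--                 if total == j:
--                     covered.append(tuple(chosen))
--                 return
--             if n - idx < j - len(chosen):
--                 return
--             dfs(idx + 1, chosen + [vals[idx]], total + cnt.get(vals[idx], 0))
--             dfs(idx + 1, chosen, total)
--
--         dfs(0, [], 0)
--         fit = 0
--         for S in covered:
--             if S not in claimed:
--                 claimed.add(S)
--                 fit += 1
--         fits.append(fit)
--     return fits
-- ===== Notes on version B (the rewrite author's own statement) =====
-- stated objective: alternative
-- what changed: Instead of testing every j-combination of set(pop) against each parent with a per-combination set rebuild, an i-scan and a linear scan of the already_research list, B enumerates per parent only the covered j-subsets by pruned backtracking over the deduplicated pop values using a precomputed count dict, and keeps claimed subsets in a set.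
import Mathlib
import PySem

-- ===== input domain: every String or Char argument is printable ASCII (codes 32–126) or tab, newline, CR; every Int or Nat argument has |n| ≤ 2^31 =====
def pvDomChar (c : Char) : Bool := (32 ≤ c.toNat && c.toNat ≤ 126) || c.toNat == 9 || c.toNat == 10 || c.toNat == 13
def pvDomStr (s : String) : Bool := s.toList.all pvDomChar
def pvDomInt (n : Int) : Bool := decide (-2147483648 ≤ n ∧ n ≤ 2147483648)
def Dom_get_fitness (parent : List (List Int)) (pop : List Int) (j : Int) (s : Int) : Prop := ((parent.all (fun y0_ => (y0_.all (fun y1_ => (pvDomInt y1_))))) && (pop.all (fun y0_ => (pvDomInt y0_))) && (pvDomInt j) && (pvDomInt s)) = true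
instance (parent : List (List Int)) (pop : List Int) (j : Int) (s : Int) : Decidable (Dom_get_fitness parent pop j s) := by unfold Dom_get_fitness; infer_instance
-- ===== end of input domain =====

-- B replaces A's scan of every j-combination (with per-combination set rebuild and a linear
-- scan of the already-claimed list) by a pruned backtracking enumeration of only the covered
-- j-subsets per parent, with a count dict per parent and a set of claimed subsets.


-- ===== PORT A =====
-- itertools.combinations over a distinct list: every r-subset once, as a sublist in input
-- order (exact up to the order of the tuples, which get_fitness's output does not depend on)
def pvCombos : List Int → Nat → List (List Int)
  | _, 0 => [[]]
  | [], _ + 1 => []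
  | x :: xs, n + 1 => ((pvCombos xs n).map (fun t => x :: t)) ++ pvCombos xs (n + 1)

def is_in_list (list1 list2 : List Int) : Bool :=
  let s2 := PySem.Set.ofList list2
  let result := list1.filter (fun e => PySem.Set.contains s2 e)
  result.length == s2.length

def get_fitness (parent : List (List Int)) (pop : List Int) (j : Int) (s : Int) : List Int :=
  -- combinations(set(pop), j); for j < 0 Python raises ValueError (excluded by Pre_)
  let j_group := if j < 0 then [] else pvCombos (PySem.Set.ofList pop) j.toNat
  if j = s then
    (parent.foldl (fun acc i =>
        let r := j_group.foldl (fun (st : Int × List (List Int)) x =>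
            if is_in_list i x && !(st.2.contains x) then (st.1 + 1, st.2 ++ [x]) else st)
          (0, acc.2)
        (acc.1 ++ [r.1], r.2)) (([] : List Int), ([] : List (List Int)))).1
  else []

-- ===== PORT B =====
-- the recursive dfs of Source B: subsets of vals of size j whose counts sum to j, with pruning
def pvDfs (cnt : PySem.Dict Int Int) (j : Int) : List Int → List Int → Int → List (List Int)
  | [], chosen, total =>
      if j < total then []
      else if (chosen.length : Int) = j then (if total = j then [chosen] else [])
      else []  -- here the size prune 0 < j - len(chosen) always fires
  | v :: rest, chosen, total =>
      if j < total then []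
      else if (chosen.length : Int) = j then (if total = j then [chosen] else [])
      else if ((v :: rest).length : Int) < j - (chosen.length : Int) then []
      else
        pvDfs cnt j rest (chosen ++ [v]) (total + cnt.getD v 0) ++ pvDfs cnt j rest chosen total

def get_fitness_alt (parent : List (List Int)) (pop : List Int) (j : Int) (s : Int) : List Int :=
  if j ≠ s then []
  else
    let vals := PySem.List.dedup pop
    (parent.foldl (fun acc ind =>
        let cnt := ind.foldl (fun (d : PySem.Dict Int Int) e => d.insert e (d.getD e 0 + 1)) PySem.Dict.empty
        let covered := pvDfs cnt j vals [] 0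
        let r := covered.foldl (fun (st : Int × PySem.Set (List Int)) S =>
            if PySem.Set.contains st.2 S then st else (st.1 + 1, PySem.Set.add st.2 S)) (0, acc.2)
        (acc.1 ++ [r.1], r.2)) (([] : List Int), (PySem.Set.empty : PySem.Set (List Int)))).1

-- ===== PRECONDITION & SPEC =====
-- Pre_ excludes exactly j < 0, where Python A raises ValueError in itertools.combinations
def Pre_get_fitness (parent : List (List Int)) (pop : List Int) (j : Int) (s : Int) : Prop := 0 ≤ j
instance (parent : List (List Int)) (pop : List Int) (j : Int) (s : Int) : Decidable (Pre_get_fitness parent pop j s) := by unfold Pre_get_fitness; infer_instance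
def pvWitness_get_fitness : List (List Int) × List Int × Int × Int := ([[1, 2], [2, 3]], [1, 2, 3], 1, 1)

def Spec_get_fitness (parent : List (List Int)) (pop : List Int) (j : Int) (s : Int) (out : List Int) : Prop := out = get_fitness_alt parent pop j s
instance (parent : List (List Int)) (pop : List Int) (j : Int) (s : Int) (out : List Int) : Decidable (Spec_get_fitness parent pop j s out) := by unfold Spec_get_fitness; infer_instance

-- ===== CLAIM (what is proved, stated in full; the proofs are below) =====
def Claim_equal_get_fitness : Prop := ∀ (parent : List (List Int)) (pop : List Int) (j : Int) (s : Int), Dom_get_fitness parent pop j s → Pre_get_fitness parent pop j s → Spec_get_fitness parent pop j s (get_fitness parent pop j s)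

-- ===== LEMMAS AND PROOFS =====

-- helper for the proofs: the weight of a subset under a count dict
def pvWsum (cnt : PySem.Dict Int Int) (t : List Int) : Int := (t.map (fun v => cnt.getD v 0)).sum

lemma pvCombos_eq_nil : ∀ (l : List Int) (k : Nat), l.length < k → pvCombos l k = [] := by
  intro l
  induction l with
  | nil => intro k hk; cases k with
    | zero => omega
    | succ n => rfl
  | cons x xs ih =>
    intro k hk
    cases k with
    | zero => omega
    | succ n =>
      simp only [pvCombos]
      rw [ih n (by simpa using Nat.lt_of_succ_lt_succ hk), ih (n+1) (by simp at hk ⊢; omega)]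
      simp

lemma sublist_of_mem_pvCombos : ∀ (l : List Int) (k : Nat) (t : List Int), t ∈ pvCombos l k → t.Sublist l := by
  intro l
  induction l with
  | nil => intro k t ht; cases k with
    | zero => simp [pvCombos] at ht; simp [ht]
    | succ n => simp [pvCombos] at ht
  | cons x xs ih =>
    intro k t ht
    cases k with
    | zero => simp [pvCombos] at ht; simp [ht]
    | succ n =>
      simp only [pvCombos, List.mem_append, List.mem_map] at ht
      rcases ht with ⟨u, hu, rfl⟩ | h
      · exact List.Sublist.cons₂ x (ih n u hu)
      · exact List.Sublist.cons x (ih (n+1) t h)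

lemma length_of_mem_pvCombos : ∀ (l : List Int) (k : Nat) (t : List Int), t ∈ pvCombos l k → t.length = k := by
  intro l
  induction l with
  | nil => intro k t ht; cases k with
    | zero => simp [pvCombos] at ht; simp [ht]
    | succ n => simp [pvCombos] at ht
  | cons x xs ih =>
    intro k t ht
    cases k with
    | zero => simp [pvCombos] at ht; simp [ht]
    | succ n =>
      simp only [pvCombos, List.mem_append, List.mem_map] at ht
      rcases ht with ⟨u, hu, rfl⟩ | h
      · simp [ih n u hu]
      · exact ih (n+1) t h

lemma pvWsum_nonneg (cnt : PySem.Dict Int Int) (h : ∀ v, 0 ≤ cnt.getD v 0) (t : List Int) : 0 ≤ pvWsum cnt t := by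
  induction t with
  | nil => simp [pvWsum]
  | cons v t ih => simp only [pvWsum, List.map_cons, List.sum_cons] at *; exact add_nonneg (h v) ih

lemma pvDfs_eq (cnt : PySem.Dict Int Int) (j : Int) (hj : 0 ≤ j) (hnn : ∀ v, 0 ≤ cnt.getD v 0) :
    ∀ (vals chosen : List Int) (total : Int), (chosen.length : Int) ≤ j →
    pvDfs cnt j vals chosen total =
      ((pvCombos vals (j - chosen.length).toNat).filter
        (fun t => decide (total + pvWsum cnt t = j))).map (fun t => chosen ++ t) := by
  intro vals
  induction vals with
  | nil =>
    intro chosen total hlen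
    by_cases h1 : j < total
    · simp only [pvDfs, if_pos h1]
      rcases Nat.eq_zero_or_pos ((j - chosen.length).toNat) with h | h
      · rw [h]
        have : ¬ (total + pvWsum cnt [] = j) := by simp [pvWsum]; omega
        simp [pvCombos, this]
      · rw [pvCombos_eq_nil [] _ (by simpa using h)]; simp
    · simp only [pvDfs, if_neg h1]
      by_cases h2 : (chosen.length : Int) = j
      · have : (j - chosen.length).toNat = 0 := by omega
        rw [if_pos h2, this]
        by_cases h3 : total = j
        · simp [pvCombos, pvWsum, h3]
        · simp [pvCombos, pvWsum, h3]
      · have : 0 < (j - chosen.length).toNat := by omega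
        rw [if_neg h2, pvCombos_eq_nil [] _ (by simpa using this)]; simp
  | cons v rest ih =>
    intro chosen total hlen
    by_cases h1 : j < total
    · simp only [pvDfs, if_pos h1]
      symm
      simp only [List.map_eq_nil_iff, List.filter_eq_nil_iff]
      intro t ht
      have := pvWsum_nonneg cnt hnn t
      simp; omega
    · simp only [pvDfs, if_neg h1]
      by_cases h2 : (chosen.length : Int) = j
      · have hz : (j - chosen.length).toNat = 0 := by omega
        rw [if_pos h2, hz]
        by_cases h3 : total = j
        · simp [pvCombos, pvWsum, h3]
        · simp [pvCombos, pvWsum, h3]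
      · rw [if_neg h2]
        have hk : (j - chosen.length).toNat = (j - (chosen.length + 1)).toNat + 1 := by omega
        by_cases h3 : ((v :: rest).length : Int) < j - (chosen.length : Int)
        · rw [if_pos h3, pvCombos_eq_nil (v :: rest) _ (by simp at h3 ⊢; omega)]; simp
        · rw [if_neg h3]
          have hlen1 : (((chosen ++ [v]).length : Nat) : Int) = (chosen.length : Int) + 1 := by
            simp
          rw [ih (chosen ++ [v]) (total + cnt.getD v 0) (by omega),
              ih chosen total (by omega), hlen1, hk]
          simp only [pvCombos, List.filter_append, List.map_append]
          congr 1
          rw [List.filter_map, List.map_map]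
          refine congrArg₂ List.map ?_ (List.filter_congr ?_)
          · funext t; simp
          · intro t ht
            simp only [Function.comp, pvWsum, List.map_cons, List.sum_cons, decide_eq_decide]
            constructor <;> intro h <;> omega

lemma sum_indicator_nodup (x : Int) : ∀ (t : List Int), t.Nodup →
    (t.map (fun v => if v = x then (1 : Int) else 0)).sum = if x ∈ t then 1 else 0 := by
  intro t
  induction t with
  | nil => simp
  | cons v t ih =>
    intro hnd
    simp only [List.nodup_cons] at hnd
    simp only [List.map_cons, List.sum_cons, ih hnd.2, List.mem_cons]
    by_cases hv : v = x
    · subst hv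
      simp [hnd.1]
    · by_cases hx : x ∈ t <;> simp [hv, hx, Ne.symm hv]

lemma filter_len_eq_wsum (t : List Int) (hnd : t.Nodup) : ∀ (l1 : List Int),
    ((l1.filter (fun e => decide (e ∈ t))).length : Int) = (t.map (fun v => (l1.count v : Int))).sum := by
  intro l1
  induction l1 with
  | nil => simp
  | cons x l ih =>
    have hcount : ∀ v : Int, ((x :: l).count v : Int) = (l.count v : Int) + (if v = x then 1 else 0) := by
      intro v
      by_cases h : v = x
      · subst h; simp [List.count_cons]
      · simp [List.count_cons, h, Ne.symm h]
    have hsum : (t.map (fun v => ((x :: l).count v : Int))).sum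
        = (t.map (fun v => (l.count v : Int))).sum + (t.map (fun v => if v = x then (1:Int) else 0)).sum := by
      rw [← List.sum_map_add]
      exact List.map_congr_left (fun v _ => hcount v) ▸ rfl
    rw [hsum, sum_indicator_nodup x t hnd, ← ih]
    by_cases hx : x ∈ t
    · simp [List.filter_cons, hx]
    · simp [List.filter_cons, hx]

lemma cnt_getD (ind : List Int) (v : Int) :
    (ind.foldl (fun (d : PySem.Dict Int Int) e => d.insert e (d.getD e 0 + 1)) PySem.Dict.empty).getD v 0
      = (ind.count v : Int) := by
  rw [PySem.Dict.getD_foldl_insert_add_one]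
  simp

lemma is_in_list_eq (i t : List Int) (j : Int) (hj : 0 ≤ j) (hnd : t.Nodup) (hlen : t.length = j.toNat) :
    is_in_list i t = decide (0 + pvWsum (i.foldl (fun (d : PySem.Dict Int Int) e => d.insert e (d.getD e 0 + 1)) PySem.Dict.empty) t = j) := by
  have hofl : PySem.Set.ofList t = t := PySem.Set.ofList_eq_self_of_nodup t hnd
  have hws : pvWsum (i.foldl (fun (d : PySem.Dict Int Int) e => d.insert e (d.getD e 0 + 1)) PySem.Dict.empty) t
      = (t.map (fun v => (i.count v : Int))).sum := by
    unfold pvWsum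
    congr 1
    exact List.map_congr_left (fun v _ => cnt_getD i v)
  have hfl := filter_len_eq_wsum t hnd i
  simp only [is_in_list, hofl, hws, zero_add]
  have hcontains : ∀ e : Int, PySem.Set.contains t e = decide (e ∈ t) := by
    intro e
    simp [PySem.Set.contains_eq_listContains, List.contains_iff_mem]
  rw [List.filter_congr (fun e _ => hcontains e)]
  have hjl : (t.length : Int) = j := by omega
  have key : (((i.filter (fun e => decide (e ∈ t))).length) = t.length)
      ↔ ((t.map (fun v => (i.count v : Int))).sum = j) := by
    rw [← hfl]; omega
  by_cases h : ((i.filter (fun e => decide (e ∈ t))).length) = t.length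
  · simp [h, key.mp h]
  · have h2 : ¬ ((t.map (fun v => (i.count v : Int))).sum = j) := fun hh => h (key.mpr hh)
    simp [h, h2]

lemma inner_eq (c : List Int → Bool) : ∀ (L : List (List Int)) (fit : Int) (alr : List (List Int)),
    L.foldl (fun (st : Int × List (List Int)) x =>
        if c x && !(st.2.contains x) then (st.1 + 1, st.2 ++ [x]) else st) (fit, alr)
    = (L.filter c).foldl (fun (st : Int × PySem.Set (List Int)) S =>
        if PySem.Set.contains st.2 S then st else (st.1 + 1, PySem.Set.add st.2 S)) (fit, alr) := by
  intro L
  induction L with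
  | nil => intro fit alr; rfl
  | cons x L ih =>
    intro fit alr
    by_cases hc : c x
    · rw [List.foldl_cons, List.filter_cons, if_pos hc, List.foldl_cons]
      by_cases hm : alr.contains x
      · have hmem : x ∈ alr := List.contains_iff_mem.mp hm
        have h1 : (c x && !(alr.contains x)) = false := by simp [hc, hmem]
        have h2 : PySem.Set.contains alr x = true := by
          simp [PySem.Set.contains_eq_listContains, hmem]
        rw [h1]
        simp only [if_neg (by simp : ¬ false = true), if_pos h2]
        exact ih fit alr
      · have hmem : x ∉ alr := fun h => hm (List.contains_iff_mem.mpr h)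
        have h1 : (c x && !(alr.contains x)) = true := by simp [hc, hmem]
        have h2 : PySem.Set.contains alr x = false := by
          simp [PySem.Set.contains_eq_listContains, hmem]
        have h3 : PySem.Set.add alr x = alr ++ [x] := by
          simp [PySem.Set.add, h2, hmem]
        rw [h1]
        simp only [h2]
        simp only [if_neg (by simp : ¬ false = true), h3]
        exact ih (fit + 1) (alr ++ [x])
    · have h1 : (c x && !(alr.contains x)) = false := by simp [hc]
      rw [List.foldl_cons, List.filter_cons, if_neg (by simp [hc] : ¬ c x = true), h1]
      simp only [if_neg (by simp : ¬ false = true)]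
      exact ih fit alr

-- per parent, B's covered list is exactly A's j_group filtered by is_in_list
lemma covered_eq (pop i : List Int) (j : Int) (hj : 0 ≤ j) :
    pvDfs (i.foldl (fun (d : PySem.Dict Int Int) e => d.insert e (d.getD e 0 + 1)) PySem.Dict.empty)
        j (PySem.Set.ofList pop) [] 0
      = (pvCombos (PySem.Set.ofList pop) j.toNat).filter (fun t => is_in_list i t) := by
  set cnt := i.foldl (fun (d : PySem.Dict Int Int) e => d.insert e (d.getD e 0 + 1)) PySem.Dict.empty with hcnt
  have hnn : ∀ v, 0 ≤ cnt.getD v 0 := by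
    intro v; rw [hcnt, cnt_getD]; positivity
  rw [pvDfs_eq cnt j hj hnn (PySem.Set.ofList pop) [] 0 (by simp; omega)]
  have hz : (j - ([] : List Int).length).toNat = j.toNat := by simp
  rw [hz]
  rw [show (fun t => ([] : List Int) ++ t) = (id : List Int → List Int) from by funext t; simp]
  rw [List.map_id]
  apply List.filter_congr
  intro t ht
  have hnd : t.Nodup := (sublist_of_mem_pvCombos _ _ t ht).nodup (PySem.Set.nodup_ofList pop)
  have hlen := length_of_mem_pvCombos _ _ t ht
  exact (is_in_list_eq i t j hj hnd hlen).symm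

theorem get_fitness_spec : Claim_equal_get_fitness := by
  intro parent pop j s _hdom hpre
  unfold Pre_get_fitness at hpre
  unfold Spec_get_fitness get_fitness get_fitness_alt
  by_cases hs : j = s
  · subst hs
    have hneg : ¬ j < 0 := by omega
    simp only [if_neg hneg, ne_eq, not_true_eq_false, if_false, if_true]
    refine congrArg Prod.fst ?_
    have hfun : (fun (acc : List Int × List (List Int)) (i : List Int) =>
          ((acc.1 ++
              [(List.foldl
                    (fun (st : Int × List (List Int)) x => if (is_in_list i x && !st.2.contains x) = true then (st.1 + 1, st.2 ++ [x]) else st)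
                    (0, acc.2) (pvCombos (PySem.Set.ofList pop) j.toNat)).1],
            (List.foldl
                (fun (st : Int × List (List Int)) x => if (is_in_list i x && !st.2.contains x) = true then (st.1 + 1, st.2 ++ [x]) else st)
                (0, acc.2) (pvCombos (PySem.Set.ofList pop) j.toNat)).2)))
        = (fun (acc : List Int × PySem.Set (List Int)) (ind : List Int) =>
          (acc.1 ++
              [(List.foldl (fun (st : Int × PySem.Set (List Int)) S => if PySem.Set.contains st.2 S = true then st else (st.1 + 1, PySem.Set.add st.2 S)) (0, acc.2)
                    (pvDfs (List.foldl (fun (d : PySem.Dict Int Int) e => d.insert e (d.getD e 0 + 1)) PySem.Dict.empty ind) j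
                      (PySem.List.dedup pop) [] 0)).1],
            (List.foldl (fun (st : Int × PySem.Set (List Int)) S => if PySem.Set.contains st.2 S = true then st else (st.1 + 1, PySem.Set.add st.2 S)) (0, acc.2)
                (pvDfs (List.foldl (fun (d : PySem.Dict Int Int) e => d.insert e (d.getD e 0 + 1)) PySem.Dict.empty ind) j
                  (PySem.List.dedup pop) [] 0)).2)) := by
      funext acc i
      have h1 : pvDfs (List.foldl (fun (d : PySem.Dict Int Int) e => d.insert e (d.getD e 0 + 1)) PySem.Dict.empty i) j
            (PySem.List.dedup pop) [] 0
          = (pvCombos (PySem.Set.ofList pop) j.toNat).filter (fun t => is_in_list i t) := by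
        rw [PySem.List.dedup_eq_ofList]
        exact covered_eq pop i j hpre
      rw [h1, ← inner_eq (fun x => is_in_list i x)]
    rw [hfun]
    rfl
  · simp [hs]
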